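-- pv_equiv track=rewrite | github.com/zhaniyazh-ch/labs_and_hms | lab1/LISTS_and_STRINGS.py | word_pattern_sort
-- ===== SOURCE A (Python) =====
-- def word_pattern_sort(text):
--     words = text.split()
--     groups = {}
--     for w in words:
--         l = len(w)
--         if l not in groups:
--             groups[l] = []
--         groups[l].append(w)
--     result = []
--     for length in sorted(groups.keys()):
--         group = groups[length]
--         group.sort(key=lambda w: (-sum(ch.lower() in "aeiou" for ch in w), w))
--         result.extend(group)
--     return result
-- ===== SOURCE B (Python) =====
-- def word_pattern_sort(text):
--     return sorted(
--         text.split(),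
--         key=lambda w: (len(w), -sum(ch.lower() in "aeiou" for ch in w), w),
--     )
-- ===== Notes on version B (the rewrite author's own statement) =====
-- stated objective: simpler
-- what changed: Replaces the length-bucket dict plus per-bucket sorts with one global sort under the composite key (len, -vowels, word).
import Mathlib
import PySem

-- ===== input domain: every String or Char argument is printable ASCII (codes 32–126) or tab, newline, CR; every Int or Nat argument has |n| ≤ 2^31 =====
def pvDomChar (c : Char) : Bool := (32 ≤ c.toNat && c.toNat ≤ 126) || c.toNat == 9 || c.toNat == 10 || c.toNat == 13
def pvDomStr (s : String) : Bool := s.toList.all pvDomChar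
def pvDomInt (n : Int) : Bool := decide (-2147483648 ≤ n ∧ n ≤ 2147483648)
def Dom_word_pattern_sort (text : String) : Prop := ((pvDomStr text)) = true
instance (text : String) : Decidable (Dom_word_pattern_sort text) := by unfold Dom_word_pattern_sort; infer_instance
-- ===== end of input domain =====

-- ===== PORT A =====
-- B changes the decomposition (one global composite-key sort instead of dict grouping); same values, similar cost.
-- shared helper: sum(ch.lower() in "aeiou" for ch in w)  (1-char 'in' on a string = character membership, exact)
def pvVowels (w : String) : Int :=
  (w.toList.map (fun c => if "aeiou".toList.contains (PySem.Chars.lowerChar c) then (1 : Int) else 0)).sum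

def word_pattern_sort (text : String) : List String :=
  let words := PySem.Str.split₀ text
  let groups := words.foldl (fun d w =>
      let l := PySem.Str.len w
      let d := if d.contains l then d else d.insert l ([] : List String)
      d.modify l [] (· ++ [w])) PySem.Dict.empty
  (PySem.List.sorted groups.keys (fun k => k)).foldl
      (fun res length =>
        res ++ PySem.List.sorted (groups.getD length []) (fun w => toLex (-(pvVowels w), w))) []

-- ===== PORT B =====
def word_pattern_sort_alt (text : String) : List String :=
  PySem.List.sorted (PySem.Str.split₀ text)
    (fun w => toLex (toLex (PySem.Str.len w, -(pvVowels w)), w))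

-- ===== PRECONDITION & SPEC =====
def Spec_word_pattern_sort (text : String) (out : List String) : Prop := out = word_pattern_sort_alt text
instance (text : String) (out : List String) : Decidable (Spec_word_pattern_sort text out) := by unfold Spec_word_pattern_sort; infer_instance

-- ===== CLAIM (what is proved, stated in full; the proofs are below) =====
def Claim_equal_word_pattern_sort : Prop := ∀ (text : String), Dom_word_pattern_sort text → Spec_word_pattern_sort text (word_pattern_sort text)

-- ===== LEMMAS AND PROOFS =====

-- the conditional "if l not in groups: groups[l] = []" before the append is a no-op next to modify's default
lemma pv_step_eq (d : PySem.Dict Int (List String)) (k : Int) (f : List String → List String) :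
    (if d.contains k then d else d.insert k ([] : List String)).modify k [] f = d.modify k [] f := by
  by_cases h : d.contains k
  · simp [h]
  · have h0 : d.getD k ([] : List String) = [] :=
      PySem.Dict.getD_of_not_contains d [] (by simpa using h)
    simp only [h, Bool.false_eq_true, if_false]
    simp [PySem.Dict.modify, PySem.Dict.insert_insert_self, PySem.Dict.getD_insert_self, h0]

lemma pv_groups_eq (words : List String) :
    words.foldl (fun d w =>
      let l := PySem.Str.len w
      let d := if d.contains l then d else d.insert l ([] : List String)
      d.modify l [] (· ++ [w])) PySem.Dict.empty
    = (words.map (fun w => (PySem.Str.len w, w))).foldl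
        (fun d p => d.modify p.1 [] (· ++ [p.2])) PySem.Dict.empty := by
  rw [List.foldl_map]
  exact PySem.List.foldl_congr_mem words _ _ _ (fun d w _ => pv_step_eq d (PySem.Str.len w) (· ++ [w]))

lemma pv_getD_groups (words : List String) (c : Int) :
    ((words.map (fun w => (PySem.Str.len w, w))).foldl
        (fun d p => d.modify p.1 [] (· ++ [p.2])) PySem.Dict.empty).getD c []
    = words.filter (fun w => PySem.Str.len w == c) := by
  rw [PySem.Dict.getD_foldl_modify_append]
  simp [List.filter_map, Function.comp_def]

lemma pv_keys_groups (words : List String) :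
    ((words.map (fun w => (PySem.Str.len w, w))).foldl
        (fun d p => d.modify p.1 [] (· ++ [p.2])) PySem.Dict.empty).keys
    = PySem.Set.ofList (words.map (fun w => PySem.Str.len w)) := by
  have := PySem.Dict.keys_foldl_modify_key (words.map (fun w => (PySem.Str.len w, w)))
      (fun p => p.1) ([] : List String)
      (fun d p => fun old => old ++ [p.2]) PySem.Dict.empty
  simp only [PySem.Dict.keys_empty] at this
  rw [this, PySem.Set.update_nil_left]
  simp [List.map_map, Function.comp_def]

-- abbreviations for the two sort keys
lemma pv_kB_le_iff (a b : String) :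
    (toLex (toLex (PySem.Str.len a, -(pvVowels a)), a) ≤ toLex (toLex (PySem.Str.len b, -(pvVowels b)), b))
    ↔ (PySem.Str.len a < PySem.Str.len b ∨ (PySem.Str.len a = PySem.Str.len b ∧
        toLex (-(pvVowels a), a) ≤ toLex (-(pvVowels b), b))) := by
  simp [Prod.Lex.le_iff, Prod.Lex.lt_iff, Prod.ext_iff]
  tauto

lemma pv_sum_ite_nodup (ks : List Int) (h : ks.Nodup) (a : Int) (f : Int → Nat) :
    (ks.map (fun k => if a = k then f k else 0)).sum = if a ∈ ks then f a else 0 := by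
  induction ks with
  | nil => simp
  | cons k t ih =>
    simp only [List.nodup_cons] at h
    by_cases hak : a = k
    · subst hak
      simp [ih h.2, h.1]
    · simp [hak, ih h.2]

-- the concatenation of the per-length buckets is a permutation of words
lemma pv_perm (words : List String) :
    ((PySem.List.sorted (PySem.Set.ofList (words.map (fun w => PySem.Str.len w))) (fun k => k)).flatMap
      (fun l => PySem.List.sorted (words.filter (fun w => PySem.Str.len w == l))
        (fun w => toLex (-(pvVowels w), w)))).Perm words := by
  rw [List.perm_iff_count]
  intro x
  set ks := PySem.List.sorted (PySem.Set.ofList (words.map (fun w => PySem.Str.len w))) (fun k => k) with hks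
  have hnd : ks.Nodup := (PySem.List.sorted_perm _ _ _).nodup_iff.mpr (PySem.Set.nodup_ofList _)
  rw [List.count_flatMap]
  have hcnt : ∀ l : Int, (List.count x ∘ fun l => PySem.List.sorted (words.filter (fun w => PySem.Str.len w == l))
        (fun w => toLex (-(pvVowels w), w))) l
      = if PySem.Str.len x = l then List.count x words else 0 := by
    intro l
    simp only [Function.comp_apply]
    rw [(PySem.List.sorted_perm _ _ _).count_eq]
    by_cases hl : PySem.Str.len x = l
    · rw [List.count_filter (by simpa using hl), if_pos hl]
    · rw [if_neg hl, List.count_eq_zero]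
      intro hmem
      exact hl (by simpa using (List.mem_filter.mp hmem).2)
  calc (ks.map (List.count x ∘ fun l => PySem.List.sorted (words.filter (fun w => PySem.Str.len w == l))
        (fun w => toLex (-(pvVowels w), w)))).sum
      = (ks.map (fun l => if PySem.Str.len x = l then List.count x words else 0)).sum := by
        exact congrArg List.sum (List.map_congr_left (fun l _ => hcnt l))
    _ = if PySem.Str.len x ∈ ks then List.count x words else 0 :=
        pv_sum_ite_nodup ks hnd (PySem.Str.len x) (fun _ => List.count x words)
    _ = List.count x words := by
        by_cases hx : x ∈ words
        · have : PySem.Str.len x ∈ ks := by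
            rw [hks, PySem.List.mem_sorted, PySem.Set.mem_ofList]
            exact List.mem_map.mpr ⟨x, hx, rfl⟩
          rw [if_pos this]
        · have h0 : List.count x words = 0 := List.count_eq_zero.mpr hx
          rw [h0, ite_self]

-- the concatenation is ordered by the composite key
lemma pv_pairwise_aux (words : List String) (ks : List Int) (hlt : ks.Pairwise (· < ·)) :
    ((ks.flatMap
      (fun l => PySem.List.sorted (words.filter (fun w => PySem.Str.len w == l))
        (fun w => toLex (-(pvVowels w), w)))).Pairwise
      (fun a b => (toLex (toLex (PySem.Str.len a, -(pvVowels a)), a) : Lex (Lex (Int × Int) × String))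
        ≤ toLex (toLex (PySem.Str.len b, -(pvVowels b)), b))) := by
  induction ks with
  | nil => simp
  | cons k t ih =>
    rw [List.flatMap_cons, List.pairwise_append]
    rw [List.pairwise_cons] at hlt
    refine ⟨?_, ih hlt.2, ?_⟩
    · have h1 := PySem.List.sorted_pairwise (words.filter (fun w => PySem.Str.len w == k))
        (fun w => toLex (-(pvVowels w), w))
      refine h1.imp_of_mem (fun {a b} ha hb hab => ?_)
      have hla : PySem.Str.len a = k := by
        have := (List.mem_filter.mp ((PySem.List.mem_sorted _ _ _ _).mp ha)).2
        simpa [beq_iff_eq] using this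
      have hlb : PySem.Str.len b = k := by
        have := (List.mem_filter.mp ((PySem.List.mem_sorted _ _ _ _).mp hb)).2
        simpa [beq_iff_eq] using this
      rw [pv_kB_le_iff]
      exact Or.inr ⟨hla.trans hlb.symm, hab⟩
    · intro a ha b hb
      have hla : PySem.Str.len a = k := by
        have := (List.mem_filter.mp ((PySem.List.mem_sorted _ _ _ _).mp ha)).2
        simpa [beq_iff_eq] using this
      obtain ⟨l, hl, hbl⟩ := List.mem_flatMap.mp hb
      have hlb : PySem.Str.len b = l := by
        have := (List.mem_filter.mp ((PySem.List.mem_sorted _ _ _ _).mp hbl)).2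
        simpa [beq_iff_eq] using this
      rw [pv_kB_le_iff]
      exact Or.inl (by rw [hla, hlb]; exact hlt.1 l hl)

lemma pv_pairwise (words : List String) :
    ((PySem.List.sorted (PySem.Set.ofList (words.map (fun w => PySem.Str.len w))) (fun k => k)).flatMap
      (fun l => PySem.List.sorted (words.filter (fun w => PySem.Str.len w == l))
        (fun w => toLex (-(pvVowels w), w)))).Pairwise
      (fun a b => (toLex (toLex (PySem.Str.len a, -(pvVowels a)), a) : Lex (Lex (Int × Int) × String))
        ≤ toLex (toLex (PySem.Str.len b, -(pvVowels b)), b)) :=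
  pv_pairwise_aux words _ (PySem.List.sorted_ofList_pairwise_lt _)

lemma pv_kB_inj : Function.Injective
    (fun w => (toLex (toLex (PySem.Str.len w, -(pvVowels w)), w) : Lex (Lex (Int × Int) × String))) := by
  intro a b h
  exact congrArg (fun x => (ofLex x).2) h

-- ===== VERDICT (by name: the statement is the Claim_ definition above) =====
theorem word_pattern_sort_spec : Claim_equal_word_pattern_sort := by
  intro text _
  unfold Spec_word_pattern_sort word_pattern_sort word_pattern_sort_alt
  simp only []
  set words := PySem.Str.split₀ text with hw
  rw [pv_groups_eq, PySem.List.foldl_append_eq_flatMap, List.nil_append]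
  have hkeys := pv_keys_groups words
  rw [hkeys]
  have hgetD : ∀ l, ((words.map (fun w => (PySem.Str.len w, w))).foldl
        (fun d p => d.modify p.1 [] (· ++ [p.2])) PySem.Dict.empty).getD l []
      = words.filter (fun w => PySem.Str.len w == l) := pv_getD_groups words
  rw [show (fun l => PySem.List.sorted (((words.map (fun w => (PySem.Str.len w, w))).foldl
        (fun d p => d.modify p.1 [] (· ++ [p.2])) PySem.Dict.empty).getD l [])
        (fun w => toLex (-(pvVowels w), w)))
      = (fun l => PySem.List.sorted (words.filter (fun w => PySem.Str.len w == l))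
        (fun w => toLex (-(pvVowels w), w))) from funext (fun l => by rw [hgetD l])]
  refine PySem.List.eq_of_perm_of_pairwise_le_of_injective
    (fun w => (toLex (toLex (PySem.Str.len w, -(pvVowels w)), w) : Lex (Lex (Int × Int) × String)))
    pv_kB_inj ?_ (pv_pairwise words) (PySem.List.sorted_pairwise words _)
  exact (pv_perm words).trans (PySem.List.sorted_perm words _ _).symm
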